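-- pv_equiv track=rewrite | github.com/winstonwilliamsiii/BBBot | compare_all_databases.py | find_unique_tables
-- ===== SOURCE A (Python) =====
-- from typing import Dict, List, Any, Tuple
--
-- def find_unique_tables(schemas: Dict[str, Dict]) -> Dict[str, List[str]]:
--     """Find tables unique to each database"""
--     unique = {}
--     all_tables = set()
--
--     for db_name, schema in schemas.items():
--         all_tables.update(schema.keys())
--
--     for db_name, schema in schemas.items():
--         other_tables = set()
--         for other_db, other_schema in schemas.items():
--             if other_db != db_name:
--                 other_tables.update(other_schema.keys())
--
--         unique[db_name] = sorted(list(set(schema.keys()) - other_tables))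
--
--     return unique
-- ===== SOURCE B (Python) =====
-- def find_unique_tables(schemas):
--     """Find tables unique to each database"""
--     counts = {}
--     for schema in schemas.values():
--         for t in set(schema):
--             counts[t] = counts.get(t, 0) + 1
--     return {db: sorted({t for t in schema if counts[t] == 1})
--             for db, schema in schemas.items()}
-- ===== Notes on version B (the rewrite author's own statement) =====
-- stated objective: faster
-- what changed: Replaces the per-database rebuild of the union of all other databases' tables with a single occurrence counter built in one pass; a table is unique to its database iff its count is 1.
import Mathlib
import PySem

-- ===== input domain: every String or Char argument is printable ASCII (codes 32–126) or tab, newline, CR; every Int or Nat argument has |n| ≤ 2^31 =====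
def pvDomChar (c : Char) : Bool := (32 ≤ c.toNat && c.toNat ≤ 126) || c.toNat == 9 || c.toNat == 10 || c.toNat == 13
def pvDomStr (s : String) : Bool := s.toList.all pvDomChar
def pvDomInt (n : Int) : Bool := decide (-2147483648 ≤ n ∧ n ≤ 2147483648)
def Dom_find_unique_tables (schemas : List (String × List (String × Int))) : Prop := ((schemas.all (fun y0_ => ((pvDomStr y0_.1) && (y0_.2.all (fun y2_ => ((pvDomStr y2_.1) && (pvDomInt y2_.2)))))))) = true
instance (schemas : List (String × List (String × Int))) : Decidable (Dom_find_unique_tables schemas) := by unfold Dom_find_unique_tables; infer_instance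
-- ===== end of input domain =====

-- B replaces A's quadratic per-database union of all other databases' tables by a single
-- occurrence counter (unique = count 1); proved equal whenever the database names are distinct
-- (the Python argument is a dict, so duplicate names cannot arise).


-- ===== PORT A =====
def find_unique_tables (schemas : List (String × List (String × Int))) : List (String × List String) :=
  -- all_tables is computed by A but never used; kept for faithfulness
  let _all_tables : PySem.Set String :=
    schemas.foldl (fun s p => PySem.Set.update s (p.2.map Prod.fst)) PySem.Set.empty
  let unique : PySem.Dict String (List String) :=
    schemas.foldl (fun u p =>
      let other_tables : PySem.Set String :=
        schemas.foldl (fun s q =>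
          if q.1 ≠ p.1 then PySem.Set.update s (q.2.map Prod.fst) else s) PySem.Set.empty
      u.insert p.1
        (PySem.List.sorted
          (PySem.Set.diff (PySem.Set.ofList (p.2.map Prod.fst)) other_tables)
          (fun x => x) false))
      PySem.Dict.empty
  unique.items

-- ===== PORT B =====
def find_unique_tables_alt (schemas : List (String × List (String × Int))) : List (String × List String) :=
  let counts : PySem.Dict String Int :=
    schemas.foldl (fun d p =>
      (PySem.Set.ofList (p.2.map Prod.fst)).foldl (fun d t => d.insert t (d.getD t 0 + 1)) d)
      PySem.Dict.empty
  schemas.map (fun p =>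
    (p.1, PySem.List.sorted
      (PySem.Set.ofList ((p.2.map Prod.fst).filter (fun t => counts.getD t 0 == 1)))
      (fun x => x) false))

-- ===== PRECONDITION & SPEC =====
-- Pre_ only rules out duplicate database names in the association list: the Python argument
-- is a dict, whose keys are necessarily distinct, so no Python input is excluded.
def Pre_find_unique_tables (schemas : List (String × List (String × Int))) : Prop :=
  (schemas.map Prod.fst).Nodup
instance (schemas : List (String × List (String × Int))) : Decidable (Pre_find_unique_tables schemas) := by unfold Pre_find_unique_tables; infer_instance
def pvWitness_find_unique_tables : (List (String × List (String × Int))) :=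
  [("db1", [("t", 1)]), ("db2", [("t", 2), ("u", 3)])]
def Spec_find_unique_tables (schemas : List (String × List (String × Int))) (out : List (String × List String)) : Prop := out = find_unique_tables_alt schemas
instance (schemas : List (String × List (String × Int))) (out : List (String × List String)) : Decidable (Spec_find_unique_tables schemas out) := by unfold Spec_find_unique_tables; infer_instance

-- ===== CLAIM (what is proved, stated in full; the proofs are below) =====
def Claim_equal_find_unique_tables : Prop := ∀ (schemas : List (String × List (String × Int))), Dom_find_unique_tables schemas → Pre_find_unique_tables schemas → Spec_find_unique_tables schemas (find_unique_tables schemas)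

-- ===== LEMMAS AND PROOFS =====

-- membership in A's accumulated union of the other databases' tables
theorem pv_mem_other (schemas : List (String × List (String × Int))) (n t : String) :
    ∀ s : PySem.Set String,
      t ∈ schemas.foldl (fun s q =>
            if q.1 ≠ n then PySem.Set.update s (q.2.map Prod.fst) else s) s ↔
        t ∈ s ∨ ∃ q ∈ schemas, q.1 ≠ n ∧ t ∈ q.2.map Prod.fst := by
  induction schemas with
  | nil => simp
  | cons q rest ih =>
    intro s
    simp only [List.foldl_cons]
    by_cases hq : q.1 ≠ n
    · rw [if_pos hq, ih]
      simp [PySem.Set.mem_update, hq, or_assoc]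
    · rw [if_neg hq, ih]
      simp only [List.mem_cons]
      constructor
      · rintro (hs | ⟨r, hr, hrn, hrt⟩)
        · exact Or.inl hs
        · exact Or.inr ⟨r, Or.inr hr, hrn, hrt⟩
      · rintro (hs | ⟨r, (rfl | hr), hrn, hrt⟩)
        · exact Or.inl hs
        · exact absurd hrn hq
        · exact Or.inr ⟨r, hr, hrn, hrt⟩

-- B's counter counts the databases containing t
theorem pv_counts_getD (schemas : List (String × List (String × Int))) (t : String) :
    ∀ d : PySem.Dict String Int,
      (schemas.foldl (fun d p =>
          (PySem.Set.ofList (p.2.map Prod.fst)).foldl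
            (fun d t => d.insert t (d.getD t 0 + 1)) d) d).getD t 0 =
        d.getD t 0 + (schemas.countP (fun q => decide (t ∈ q.2.map Prod.fst)) : Int) := by
  induction schemas with
  | nil => simp
  | cons p rest ih =>
    intro d
    simp only [List.foldl_cons, ih, PySem.Dict.getD_foldl_insert_add_one]
    by_cases hm : t ∈ p.2.map Prod.fst
    · rw [List.countP_cons_of_pos (by simpa using hm),
        List.count_eq_one_of_mem (PySem.Set.nodup_ofList _) ((PySem.Set.mem_ofList _ _).mpr hm)]
      push_cast; ring
    · rw [List.countP_cons_of_neg (by simpa using hm),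
        List.count_eq_zero_of_not_mem (fun h => hm ((PySem.Set.mem_ofList _ _).mp h))]
      ring

-- for a database p of a duplicate-free schema list, "t occurs in exactly one database" is
-- "t occurs in no *other* database" (for t a table of p)
theorem pv_count_one_iff (schemas : List (String × List (String × Int)))
    (hnd : (schemas.map Prod.fst).Nodup) (p : String × List (String × Int))
    (hp : p ∈ schemas) (t : String) (ht : t ∈ p.2.map Prod.fst) :
    schemas.countP (fun q => decide (t ∈ q.2.map Prod.fst)) = 1 ↔
      ¬ ∃ q ∈ schemas, q.1 ≠ p.1 ∧ t ∈ q.2.map Prod.fst := by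
  obtain ⟨l1, l2, rfl⟩ := List.append_of_mem hp
  simp only [List.map_append, List.map_cons, List.nodup_append, List.nodup_cons,
    List.mem_cons, List.mem_map] at hnd
  have hne : ∀ q ∈ l1 ++ l2, q.1 ≠ p.1 := by
    intro q hq
    rcases List.mem_append.mp hq with h | h
    · exact hnd.2.2 q.1 ⟨q, h, rfl⟩ p.1 (Or.inl rfl)
    · exact fun e => hnd.2.1.1 ⟨q, h, e⟩
  rw [List.countP_append, List.countP_cons_of_pos (by simpa using ht)]
  constructor
  · intro h1 ⟨q, hq, hqn, hqt⟩
    have hq' : q ∈ l1 ++ l2 := by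
      rcases List.mem_append.mp hq with h | h
      · exact List.mem_append.mpr (Or.inl h)
      · rcases List.mem_cons.mp h with rfl | h
        · exact absurd rfl hqn
        · exact List.mem_append.mpr (Or.inr h)
      
    have : 0 < (l1 ++ l2).countP (fun q => decide (t ∈ q.2.map Prod.fst)) := by
      rw [List.countP_pos_iff]; exact ⟨q, hq', by simpa using hqt⟩
    rw [List.countP_append] at this
    omega
  · intro hno
    have h1 : l1.countP (fun q => decide (t ∈ q.2.map Prod.fst)) = 0 := by
      rw [List.countP_eq_zero]
      intro q hq
      simp only [decide_eq_true_eq]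
      exact fun hqt => hno ⟨q, List.mem_append.mpr (Or.inl hq),
        hne q (List.mem_append.mpr (Or.inl hq)), hqt⟩
    have h2 : l2.countP (fun q => decide (t ∈ q.2.map Prod.fst)) = 0 := by
      rw [List.countP_eq_zero]
      intro q hq
      simp only [decide_eq_true_eq]
      exact fun hqt => hno ⟨q, List.mem_append.mpr (Or.inr (List.mem_cons.mpr (Or.inr hq))),
        hne q (List.mem_append.mpr (Or.inr hq)), hqt⟩
    omega

-- ===== VERDICT (by name: the statement is the Claim_ definition above) =====
theorem find_unique_tables_spec : Claim_equal_find_unique_tables := by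
  intro schemas _ hnd
  unfold Pre_find_unique_tables at hnd
  show find_unique_tables schemas = find_unique_tables_alt schemas
  simp only [find_unique_tables, find_unique_tables_alt]
  rw [PySem.Dict.items_foldl_insert_fresh _ Prod.fst _ PySem.Dict.empty
    (fun a _ => PySem.Dict.contains_empty a.1) hnd]
  simp only [PySem.Dict.empty, List.nil_append]
  apply List.map_congr_left
  intro p hp
  refine congrArg (fun v => (p.1, v)) ?_
  apply PySem.List.sorted_eq_sorted_of_perm _ _ _ (fun a b h => h)
  apply (List.perm_ext_iff_of_nodup
    (PySem.Set.nodup_diff _ _ (PySem.Set.nodup_ofList _)) (PySem.Set.nodup_ofList _)).mpr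
  intro t
  rw [PySem.Set.mem_diff, PySem.Set.mem_ofList, PySem.Set.mem_ofList,
    List.mem_filter, pv_mem_other schemas p.1 t]
  constructor
  · rintro ⟨ht, hno⟩
    refine ⟨ht, ?_⟩
    rw [pv_counts_getD]
    have := (pv_count_one_iff schemas hnd p hp t ht).mpr
      (fun ⟨q, hq, hn, hqt⟩ => hno (Or.inr ⟨q, hq, hn, hqt⟩))
    simp [this, PySem.Dict.getD, PySem.Dict.get?]
  · rintro ⟨ht, hc⟩
    rw [pv_counts_getD] at hc
    refine ⟨ht, ?_⟩
    have hcn : schemas.countP (fun q => decide (t ∈ q.2.map Prod.fst)) = 1 := by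
      simp [PySem.Dict.getD, PySem.Dict.get?] at hc; exact_mod_cast hc
    rintro (hs | hex)
    · simp [PySem.Set.empty] at hs
    · exact (pv_count_one_iff schemas hnd p hp t ht).mp hcn hex
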